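-- pv_equiv track=rewrite | github.com/AndyLee1024/agent-sdk | examples/terminal_agent/fragment_utils.py | clip_fragments
-- ===== SOURCE A (Python) =====
-- def clip_fragments(
--     fragments: list[tuple[str, str]],
--     max_len: int,
-- ) -> list[tuple[str, str]]:
--     if max_len <= 0:
--         return []
--
--     remaining = max_len
--     clipped: list[tuple[str, str]] = []
--     for style, text in fragments:
--         if remaining <= 0:
--             break
--         if len(text) <= remaining:
--             clipped.append((style, text))
--             remaining -= len(text)
--             continue
--         clipped.append((style, text[:remaining]))
--         break
--
--     return clipped
-- ===== SOURCE B (Python) =====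
-- def clip_fragments(
--     fragments: list[tuple[str, str]],
--     max_len: int,
-- ) -> list[tuple[str, str]]:
--     if max_len <= 0:
--         return []
--     # prefix sums of text lengths
--     cum = []
--     total = 0
--     for _, text in fragments:
--         total += len(text)
--         cum.append(total)
--     # first fragment whose cumulative length reaches the budget
--     cut = next((i for i, c in enumerate(cum) if c >= max_len), None)
--     if cut is None:
--         return list(fragments)
--     prev = cum[cut - 1] if cut > 0 else 0
--     style, text = fragments[cut]
--     return fragments[:cut] + [(style, text[: max_len - prev])]
-- ===== Notes on version B (the rewrite author's own statement) =====
-- stated objective: alternative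
-- what changed: Replaces the running-budget loop with prefix sums of text lengths plus a single cutoff-index search: fragments before the cutoff are emitted whole and the boundary fragment is sliced to the leftover budget.
import Mathlib
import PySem

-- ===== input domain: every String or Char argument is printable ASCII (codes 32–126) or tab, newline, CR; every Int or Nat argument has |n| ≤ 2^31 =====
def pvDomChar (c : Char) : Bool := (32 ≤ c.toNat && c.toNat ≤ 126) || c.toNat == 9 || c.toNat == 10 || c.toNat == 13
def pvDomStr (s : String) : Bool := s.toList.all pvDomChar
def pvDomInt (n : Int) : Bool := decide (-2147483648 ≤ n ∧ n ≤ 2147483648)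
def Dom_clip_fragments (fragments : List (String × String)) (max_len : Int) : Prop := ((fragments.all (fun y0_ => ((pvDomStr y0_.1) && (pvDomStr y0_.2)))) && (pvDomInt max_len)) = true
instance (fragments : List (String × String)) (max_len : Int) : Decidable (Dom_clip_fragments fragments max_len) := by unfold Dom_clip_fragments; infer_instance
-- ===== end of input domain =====

-- B replaces A's running-budget loop by prefix sums of the text lengths plus a single
-- cutoff-index search (objective: alternative decomposition, same cost).

-- ===== PORT A =====
-- A's for-loop over (style, text) with the mutable 'remaining' budget and its two breaks.
def pvClipLoop : List (String × String) → Int → List (String × String)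
  | [], _ => []
  | (style, text) :: rest, remaining =>
    if remaining ≤ 0 then []
    else if PySem.Str.len text ≤ remaining then
      (style, text) :: pvClipLoop rest (remaining - PySem.Str.len text)
    else
      [(style, PySem.Str.slice text none (some remaining))]

def clip_fragments (fragments : List (String × String)) (max_len : Int) : List (String × String) :=
  if max_len ≤ 0 then []
  else pvClipLoop fragments max_len

-- ===== PORT B =====
-- Source B's prefix-sum loop building 'cum' (carrying the running 'total')
def pvCum : List (String × String) → Int → List Int
  | [], _ => []
  | f :: rest, total =>
    let total' := total + PySem.Str.len f.2
    total' :: pvCum rest total'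

-- next((i for i, c in enumerate(cum) if c >= max_len), None)
def pvCut (max_len : Int) : List Int → Option Nat
  | [] => none
  | c :: rest => if max_len ≤ c then some 0 else (pvCut max_len rest).map (· + 1)

def clip_fragments_alt (fragments : List (String × String)) (max_len : Int) : List (String × String) :=
  if max_len ≤ 0 then []
  else
    let cum := pvCum fragments 0
    match pvCut max_len cum with
    | none => fragments
    | some cut =>
      -- prev = cum[cut - 1] if cut > 0 else 0  (the index is always in range, so getD is exact)
      let prev : Int := match cut with | 0 => 0 | Nat.succ k => cum.getD k 0
      -- style, text = fragments[cut]  (always in range when pvCut returns some)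
      match fragments.drop cut with
      | [] => []
      | (style, text) :: _ =>
        fragments.take cut ++ [(style, PySem.Str.slice text none (some (max_len - prev)))]

-- ===== PRECONDITION & SPEC =====
def Spec_clip_fragments (fragments : List (String × String)) (max_len : Int) (out : List (String × String)) : Prop := out = clip_fragments_alt fragments max_len
instance (fragments : List (String × String)) (max_len : Int) (out : List (String × String)) : Decidable (Spec_clip_fragments fragments max_len out) := by unfold Spec_clip_fragments; infer_instance

-- ===== CLAIM (what is proved, stated in full; the proofs are below) =====
def Claim_equal_clip_fragments : Prop := ∀ (fragments : List (String × String)) (max_len : Int), Dom_clip_fragments fragments max_len → Spec_clip_fragments fragments max_len (clip_fragments fragments max_len)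

-- ===== LEMMAS AND PROOFS =====

theorem pvClipLoop_nonpos (xs : List (String × String)) (r : Int) (h : r ≤ 0) :
    pvClipLoop xs r = [] := by
  cases xs with
  | nil => rfl
  | cons f rest => obtain ⟨s, t⟩ := f; simp [pvClipLoop, h]

theorem pvCum_shift (xs : List (String × String)) (a : Int) : ∀ b : Int,
    pvCum xs (a + b) = (pvCum xs b).map (fun c => a + c) := by
  induction xs with
  | nil => intro b; rfl
  | cons f rest ih =>
    intro b
    simp only [pvCum, List.map_cons]
    rw [show a + b + PySem.Str.len f.2 = a + (b + PySem.Str.len f.2) by ring,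
      ih (b + PySem.Str.len f.2)]

theorem pvCum_length (xs : List (String × String)) : ∀ a : Int,
    (pvCum xs a).length = xs.length := by
  induction xs with
  | nil => intro a; rfl
  | cons f rest ih => intro a; simp [pvCum, ih]

theorem pvCut_map (m a : Int) (cs : List Int) :
    pvCut m (cs.map (fun c => a + c)) = pvCut (m - a) cs := by
  induction cs with
  | nil => rfl
  | cons c rest ih =>
    by_cases h : m - a ≤ c
    · simp [pvCut, show m ≤ a + c by omega, h]
    · simp [pvCut, show ¬ m ≤ a + c by omega, h, ih]

theorem pvCut_lt (m : Int) (cs : List Int) (k : Nat) (h : pvCut m cs = some k) :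
    k < cs.length := by
  induction cs generalizing k with
  | nil => simp [pvCut] at h
  | cons c rest ih =>
    by_cases hm : m ≤ c
    · simp [pvCut, hm] at h
      simp [← h]
    · simp only [pvCut, if_neg hm, Option.map_eq_some_iff] at h
      obtain ⟨j, hj, hk⟩ := h
      have := ih j hj
      simp only [List.length_cons]
      omega

theorem str_len_nonneg (t : String) : 0 ≤ PySem.Str.len t := by
  rw [PySem.Str.len_eq]; positivity

theorem slice_full (t : String) (m : Int) (h : m = PySem.Str.len t) :
    PySem.Str.slice t none (some m) = t := by
  apply String.ext
  rw [PySem.Str.toList_slice, PySem.Chars.slice_eq_listSlice,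
    PySem.List.slice_to (xs := t.toList) (by rw [h]; exact str_len_nonneg t)]
  apply List.take_of_length_le
  rw [h, PySem.Str.len_eq]
  simp

theorem pvMain (fragments : List (String × String)) : ∀ m : Int, 0 < m →
    pvClipLoop fragments m = clip_fragments_alt fragments m := by
  induction fragments with
  | nil =>
    intro m hm
    simp [pvClipLoop, clip_fragments_alt, pvCum, pvCut, show ¬ m ≤ 0 by omega]
  | cons f rest ih =>
    intro m hm
    obtain ⟨s, t⟩ := f
    set L := PySem.Str.len t with hLdef
    have hcum : pvCum ((s, t) :: rest) 0 = L :: (pvCum rest 0).map (fun c => L + c) := by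
      have h1 := pvCum_shift rest L 0
      rw [add_zero] at h1
      simp only [pvCum, zero_add, ← hLdef, h1]
    by_cases hmL : m ≤ L
    · -- the first fragment is the boundary
      have hcut : pvCut m (pvCum ((s, t) :: rest) 0) = some 0 := by
        rw [hcum]; simp [pvCut, hmL]
      simp only [clip_fragments_alt, if_neg (show ¬ m ≤ 0 by omega), hcut,
        List.drop_zero, List.take_zero, List.nil_append]
      by_cases hfit : L ≤ m
      · have hEq : m = L := le_antisymm hmL hfit
        simp only [pvClipLoop, if_neg (show ¬ m ≤ 0 by omega), ← hLdef, if_pos hfit]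
        rw [pvClipLoop_nonpos rest (m - L) (by omega),
          show m - 0 = m by ring, slice_full t m hEq]
      · simp only [pvClipLoop, if_neg (show ¬ m ≤ 0 by omega), ← hLdef, if_neg hfit]
        rw [show m - 0 = m by ring]
    · -- the first fragment fits strictly: recurse on the tail with the reduced budget
      have hfit : L ≤ m := by omega
      simp only [pvClipLoop, if_neg (show ¬ m ≤ 0 by omega), ← hLdef, if_pos hfit]
      rw [ih (m - L) (by omega)]
      have hmap := pvCut_map m L (pvCum rest 0)
      cases hc : pvCut (m - L) (pvCum rest 0) with
      | none =>
        have hcut : pvCut m (pvCum ((s, t) :: rest) 0) = none := by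
          rw [hcum]; simp [pvCut, show ¬ m ≤ L by omega, hmap, hc]
        simp only [clip_fragments_alt, if_neg (show ¬ m ≤ 0 by omega),
          if_neg (show ¬ m - L ≤ 0 by omega), hcut, hc]
      | some k =>
        have hklt : k < (pvCum rest 0).length := pvCut_lt _ _ _ hc
        have hkrest : k < rest.length := by rw [pvCum_length] at hklt; exact hklt
        have hcut : pvCut m (pvCum ((s, t) :: rest) 0) = some (k + 1) := by
          rw [hcum]; simp [pvCut, show ¬ m ≤ L by omega, hmap, hc]
        cases k with
        | zero =>
          cases rest with
          | nil => simp at hkrest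
          | cons b tl =>
            obtain ⟨bs, bt⟩ := b
            simp only [clip_fragments_alt, if_neg (show ¬ m ≤ 0 by omega),
              if_neg (show ¬ m - L ≤ 0 by omega), hcut, hc]
            simp only [hcum, List.getD_cons_zero, List.drop_succ_cons, List.drop_zero,
              List.take_succ_cons, List.take_zero, List.nil_append, List.cons_append, sub_zero]
        | succ j =>
          have hj : j < (pvCum rest 0).length := by omega
          have hgd : (pvCum ((s, t) :: rest) 0).getD (j + 1) 0
              = L + (pvCum rest 0).getD j 0 := by
            rw [hcum]
            simp only [List.getD_cons_succ]
            rw [List.getD_eq_getElem _ _ (by simpa using hj), List.getD_eq_getElem _ _ hj]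
            simp
          cases hd : rest.drop (j + 1) with
          | nil =>
            exfalso
            have := List.length_drop (l := rest) (i := j + 1)
            rw [hd] at this
            simp at this
            omega
          | cons b tl =>
            obtain ⟨bs, bt⟩ := b
            simp only [clip_fragments_alt, if_neg (show ¬ m ≤ 0 by omega),
              if_neg (show ¬ m - L ≤ 0 by omega), hcut, hc,
              List.drop_succ_cons, List.take_succ_cons, List.cons_append, hd, hgd]
            rw [show m - (L + (pvCum rest 0).getD j 0)
                = m - L - (pvCum rest 0).getD j 0 by ring]

-- ===== VERDICT (by name: the statement is the Claim_ definition above) =====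
theorem clip_fragments_spec : Claim_equal_clip_fragments := by
  intro fragments max_len _
  unfold Spec_clip_fragments clip_fragments
  by_cases h : max_len ≤ 0
  · simp [h, clip_fragments_alt]
  · simp only [if_neg h]
    exact pvMain fragments max_len (by omega)
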